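-- pv_equiv track=rewrite | github.com/cinqbox/tournament | utils/fix_rating.py | rating_for_double
-- ===== SOURCE A (Python) =====
-- def rating_for_double(rate_list):
--     for data in rate_list:
--         if data['rate_rank'] > 48:
--             data['rate_rank'] = 64
--         elif data['rate_rank'] > 32:
--             data['rate_rank'] = 48
--         elif data['rate_rank'] > 24:
--             data['rate_rank'] = 32
--         elif data['rate_rank'] > 16:
--             data['rate_rank'] = 24
--         elif data['rate_rank'] > 12:
--             data['rate_rank'] = 16
--         elif data['rate_rank'] > 8:
--             data['rate_rank'] = 12
--         elif data['rate_rank'] > 6: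
--             data['rate_rank'] = 8
--         elif data['rate_rank'] > 4:
--             data['rate_rank'] = 6
--         elif data['rate_rank'] > 3:
--             data['rate_rank'] = 4
--         elif data['rate_rank'] > 2:
--             data['rate_rank'] = 3
--         elif data['rate_rank'] > 1:
--             data['rate_rank'] = 2
--         else:
--             data['rate_rank'] = 1
--     return rate_list
-- ===== SOURCE B (Python) =====
-- import bisect
--
-- _THRESHOLDS = [1, 2, 3, 4, 6, 8, 12, 16, 24, 32, 48]
-- _RESULTS = [1, 2, 3, 4, 6, 8, 12, 16, 24, 32, 48, 64]
--
--
-- def rating_for_double(rate_list):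
--     for data in rate_list:
--         data['rate_rank'] = _RESULTS[bisect.bisect_left(_THRESHOLDS, data['rate_rank'])]
--     return rate_list
-- ===== Notes on version B (the rewrite author's own statement) =====
-- stated objective: idiomatic
-- what changed: Replaces the 12-branch comparison chain with a table-driven bisect_left over a sorted threshold list and a parallel results table.
import Mathlib
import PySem

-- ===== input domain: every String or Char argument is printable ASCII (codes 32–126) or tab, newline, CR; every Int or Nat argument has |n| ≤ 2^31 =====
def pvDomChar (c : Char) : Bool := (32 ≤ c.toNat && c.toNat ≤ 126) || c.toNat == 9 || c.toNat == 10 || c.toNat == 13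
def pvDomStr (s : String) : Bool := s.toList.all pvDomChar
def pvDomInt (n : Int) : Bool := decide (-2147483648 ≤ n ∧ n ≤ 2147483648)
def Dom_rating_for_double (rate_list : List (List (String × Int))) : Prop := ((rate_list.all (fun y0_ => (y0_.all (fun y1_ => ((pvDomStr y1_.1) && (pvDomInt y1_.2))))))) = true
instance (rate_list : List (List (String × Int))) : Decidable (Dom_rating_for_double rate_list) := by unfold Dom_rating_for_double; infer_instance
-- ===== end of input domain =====

-- B mutates each dict in place and returns the same list object, exactly as A does;
-- the equivalence proved here is about the returned value.

-- dict primitives shared by both ports (not part of either algorithm):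
-- d[k] lookup = first match; d[k] = v overwrites the first occurrence in place (appends if absent)
def pyGetItem (d : List (String × Int)) (k : String) : Option Int :=
  (d.find? (fun p => p.1 == k)).map (·.2)

def pySetItem (d : List (String × Int)) (k : String) (v : Int) : List (String × Int) :=
  match d with
  | [] => [(k, v)]
  | (k', v') :: rest => if k' == k then (k, v) :: rest else (k', v') :: pySetItem rest k v

-- ===== PORT A =====
-- literal transliteration of A's comparison chain; on a missing 'rate_rank' key
-- Python raises KeyError (excluded by Pre_), the port leaves that dict unchanged
def rating_for_double (rate_list : List (List (String × Int))) : List (List (String × Int)) :=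
  rate_list.map (fun data =>
    match pyGetItem data "rate_rank" with
    | none => data
    | some r =>
      pySetItem data "rate_rank"
        (if r > 48 then 64
         else if r > 32 then 48
         else if r > 24 then 32
         else if r > 16 then 24
         else if r > 12 then 16
         else if r > 8 then 12
         else if r > 6 then 8
         else if r > 4 then 6
         else if r > 3 then 4
         else if r > 2 then 3
         else if r > 1 then 2
         else 1))

-- ===== PORT B =====
def pvThresholds : List Int := [1, 2, 3, 4, 6, 8, 12, 16, 24, 32, 48]
def pvResults : List Int := [1, 2, 3, 4, 6, 8, 12, 16, 24, 32, 48, 64]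

-- bisect.bisect_left on a sorted list: first index whose element is ≥ v (length if none);
-- List.findIdx returns exactly that. The index is always < pvResults.length, so getD's
-- default is never used (Python's _RESULTS[i] never raises here).
def pvBisectLeft (xs : List Int) (v : Int) : Nat := xs.findIdx (fun t => v ≤ t)

def rating_for_double_alt (rate_list : List (List (String × Int))) : List (List (String × Int)) :=
  rate_list.map (fun data =>
    match pyGetItem data "rate_rank" with
    | none => data
    | some r => pySetItem data "rate_rank" (pvResults.getD (pvBisectLeft pvThresholds r) 0))

-- ===== PRECONDITION & SPEC =====
-- Pre_ excludes exactly the inputs where Python A raises KeyError: a dict without 'rate_rank'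
def Pre_rating_for_double (rate_list : List (List (String × Int))) : Prop :=
  (rate_list.all (fun data => data.any (fun p => p.1 == "rate_rank"))) = true
instance (rate_list : List (List (String × Int))) : Decidable (Pre_rating_for_double rate_list) := by
  unfold Pre_rating_for_double; infer_instance

def pvWitness_rating_for_double : (List (List (String × Int))) :=
  [[("rate_rank", 5), ("id", 1)], [("rate_rank", 49)]]

def Spec_rating_for_double (rate_list : List (List (String × Int))) (out : List (List (String × Int))) : Prop := out = rating_for_double_alt rate_list
instance (rate_list : List (List (String × Int))) (out : List (List (String × Int))) : Decidable (Spec_rating_for_double rate_list out) := by unfold Spec_rating_for_double; infer_instance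

-- ===== CLAIM (what is proved, stated in full; the proofs are below) =====
def Claim_equal_rating_for_double : Prop := ∀ (rate_list : List (List (String × Int))), Dom_rating_for_double rate_list → Pre_rating_for_double rate_list → Spec_rating_for_double rate_list (rating_for_double rate_list)

-- ===== LEMMAS AND PROOFS =====
-- the per-element value: A's comparison chain equals B's table lookup on every Int
theorem pv_bucket_eq (r : Int) :
    (if r > 48 then (64:Int)
     else if r > 32 then 48
     else if r > 24 then 32
     else if r > 16 then 24
     else if r > 12 then 16
     else if r > 8 then 12
     else if r > 6 then 8
     else if r > 4 then 6
     else if r > 3 then 4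
     else if r > 2 then 3
     else if r > 1 then 2
     else 1)
    = pvResults.getD (pvBisectLeft pvThresholds r) 0 := by
  unfold pvBisectLeft pvThresholds
  simp only [List.findIdx_cons, Bool.cond_eq_ite, decide_eq_true_eq]
  rcases le_or_gt r 1 with h0|h0
  · rw [if_neg (show ¬ r > 48 by omega), if_neg (show ¬ r > 32 by omega), if_neg (show ¬ r > 24 by omega), if_neg (show ¬ r > 16 by omega), if_neg (show ¬ r > 12 by omega), if_neg (show ¬ r > 8 by omega), if_neg (show ¬ r > 6 by omega), if_neg (show ¬ r > 4 by omega), if_neg (show ¬ r > 3 by omega), if_neg (show ¬ r > 2 by omega), if_neg (show ¬ r > 1 by omega), if_pos (show r ≤ 1 by omega)]; norm_num [pvResults]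
  rcases le_or_gt r 2 with h1|h1
  · rw [if_neg (show ¬ r > 48 by omega), if_neg (show ¬ r > 32 by omega), if_neg (show ¬ r > 24 by omega), if_neg (show ¬ r > 16 by omega), if_neg (show ¬ r > 12 by omega), if_neg (show ¬ r > 8 by omega), if_neg (show ¬ r > 6 by omega), if_neg (show ¬ r > 4 by omega), if_neg (show ¬ r > 3 by omega), if_neg (show ¬ r > 2 by omega), if_pos (show r > 1 by omega), if_neg (show ¬ r ≤ 1 by omega), if_pos (show r ≤ 2 by omega)]; norm_num [pvResults]
  rcases le_or_gt r 3 with h2|h2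
  · rw [if_neg (show ¬ r > 48 by omega), if_neg (show ¬ r > 32 by omega), if_neg (show ¬ r > 24 by omega), if_neg (show ¬ r > 16 by omega), if_neg (show ¬ r > 12 by omega), if_neg (show ¬ r > 8 by omega), if_neg (show ¬ r > 6 by omega), if_neg (show ¬ r > 4 by omega), if_neg (show ¬ r > 3 by omega), if_pos (show r > 2 by omega), if_neg (show ¬ r ≤ 1 by omega), if_neg (show ¬ r ≤ 2 by omega), if_pos (show r ≤ 3 by omega)]; norm_num [pvResults]
  rcases le_or_gt r 4 with h3|h3
  · rw [if_neg (show ¬ r > 48 by omega), if_neg (show ¬ r > 32 by omega), if_neg (show ¬ r > 24 by omega), if_neg (show ¬ r > 16 by omega), if_neg (show ¬ r > 12 by omega), if_neg (show ¬ r > 8 by omega), if_neg (show ¬ r > 6 by omega), if_neg (show ¬ r > 4 by omega), if_pos (show r > 3 by omega), if_neg (show ¬ r ≤ 1 by omega), if_neg (show ¬ r ≤ 2 by omega), if_neg (show ¬ r ≤ 3 by omega), if_pos (show r ≤ 4 by omega)]; norm_num [pvResults]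
  rcases le_or_gt r 6 with h4|h4
  · rw [if_neg (show ¬ r > 48 by omega), if_neg (show ¬ r > 32 by omega), if_neg (show ¬ r > 24 by omega), if_neg (show ¬ r > 16 by omega), if_neg (show ¬ r > 12 by omega), if_neg (show ¬ r > 8 by omega), if_neg (show ¬ r > 6 by omega), if_pos (show r > 4 by omega), if_neg (show ¬ r ≤ 1 by omega), if_neg (show ¬ r ≤ 2 by omega), if_neg (show ¬ r ≤ 3 by omega), if_neg (show ¬ r ≤ 4 by omega), if_pos (show r ≤ 6 by omega)]; norm_num [pvResults]
  rcases le_or_gt r 8 with h5|h5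
  · rw [if_neg (show ¬ r > 48 by omega), if_neg (show ¬ r > 32 by omega), if_neg (show ¬ r > 24 by omega), if_neg (show ¬ r > 16 by omega), if_neg (show ¬ r > 12 by omega), if_neg (show ¬ r > 8 by omega), if_pos (show r > 6 by omega), if_neg (show ¬ r ≤ 1 by omega), if_neg (show ¬ r ≤ 2 by omega), if_neg (show ¬ r ≤ 3 by omega), if_neg (show ¬ r ≤ 4 by omega), if_neg (show ¬ r ≤ 6 by omega), if_pos (show r ≤ 8 by omega)]; norm_num [pvResults]
  rcases le_or_gt r 12 with h6|h6
  · rw [if_neg (show ¬ r > 48 by omega), if_neg (show ¬ r > 32 by omega), if_neg (show ¬ r > 24 by omega), if_neg (show ¬ r > 16 by omega), if_neg (show ¬ r > 12 by omega), if_pos (show r > 8 by omega), if_neg (show ¬ r ≤ 1 by omega), if_neg (show ¬ r ≤ 2 by omega), if_neg (show ¬ r ≤ 3 by omega), if_neg (show ¬ r ≤ 4 by omega), if_neg (show ¬ r ≤ 6 by omega), if_neg (show ¬ r ≤ 8 by omega), if_pos (show r ≤ 12 by omega)]; norm_num [pvResults]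
  rcases le_or_gt r 16 with h7|h7
  · rw [if_neg (show ¬ r > 48 by omega), if_neg (show ¬ r > 32 by omega), if_neg (show ¬ r > 24 by omega), if_neg (show ¬ r > 16 by omega), if_pos (show r > 12 by omega), if_neg (show ¬ r ≤ 1 by omega), if_neg (show ¬ r ≤ 2 by omega), if_neg (show ¬ r ≤ 3 by omega), if_neg (show ¬ r ≤ 4 by omega), if_neg (show ¬ r ≤ 6 by omega), if_neg (show ¬ r ≤ 8 by omega), if_neg (show ¬ r ≤ 12 by omega), if_pos (show r ≤ 16 by omega)]; norm_num [pvResults]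
  rcases le_or_gt r 24 with h8|h8
  · rw [if_neg (show ¬ r > 48 by omega), if_neg (show ¬ r > 32 by omega), if_neg (show ¬ r > 24 by omega), if_pos (show r > 16 by omega), if_neg (show ¬ r ≤ 1 by omega), if_neg (show ¬ r ≤ 2 by omega), if_neg (show ¬ r ≤ 3 by omega), if_neg (show ¬ r ≤ 4 by omega), if_neg (show ¬ r ≤ 6 by omega), if_neg (show ¬ r ≤ 8 by omega), if_neg (show ¬ r ≤ 12 by omega), if_neg (show ¬ r ≤ 16 by omega), if_pos (show r ≤ 24 by omega)]; norm_num [pvResults]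
  rcases le_or_gt r 32 with h9|h9
  · rw [if_neg (show ¬ r > 48 by omega), if_neg (show ¬ r > 32 by omega), if_pos (show r > 24 by omega), if_neg (show ¬ r ≤ 1 by omega), if_neg (show ¬ r ≤ 2 by omega), if_neg (show ¬ r ≤ 3 by omega), if_neg (show ¬ r ≤ 4 by omega), if_neg (show ¬ r ≤ 6 by omega), if_neg (show ¬ r ≤ 8 by omega), if_neg (show ¬ r ≤ 12 by omega), if_neg (show ¬ r ≤ 16 by omega), if_neg (show ¬ r ≤ 24 by omega), if_pos (show r ≤ 32 by omega)]; norm_num [pvResults]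
  rcases le_or_gt r 48 with h10|h10
  · rw [if_neg (show ¬ r > 48 by omega), if_pos (show r > 32 by omega), if_neg (show ¬ r ≤ 1 by omega), if_neg (show ¬ r ≤ 2 by omega), if_neg (show ¬ r ≤ 3 by omega), if_neg (show ¬ r ≤ 4 by omega), if_neg (show ¬ r ≤ 6 by omega), if_neg (show ¬ r ≤ 8 by omega), if_neg (show ¬ r ≤ 12 by omega), if_neg (show ¬ r ≤ 16 by omega), if_neg (show ¬ r ≤ 24 by omega), if_neg (show ¬ r ≤ 32 by omega), if_pos (show r ≤ 48 by omega)]; norm_num [pvResults]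
  rw [if_pos (show r > 48 by omega), if_neg (show ¬ r ≤ 1 by omega), if_neg (show ¬ r ≤ 2 by omega), if_neg (show ¬ r ≤ 3 by omega), if_neg (show ¬ r ≤ 4 by omega), if_neg (show ¬ r ≤ 6 by omega), if_neg (show ¬ r ≤ 8 by omega), if_neg (show ¬ r ≤ 12 by omega), if_neg (show ¬ r ≤ 16 by omega), if_neg (show ¬ r ≤ 24 by omega), if_neg (show ¬ r ≤ 32 by omega), if_neg (show ¬ r ≤ 48 by omega)]; norm_num [pvResults]

theorem rating_for_double_spec : Claim_equal_rating_for_double := by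
  intro rate_list _ _
  unfold Spec_rating_for_double rating_for_double rating_for_double_alt
  refine List.map_congr_left (fun data _ => ?_)
  cases pyGetItem data "rate_rank" with
  | none => rfl
  | some r => simp only [pv_bucket_eq]
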